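-- pv_equiv track=rewrite | github.com/pypi-data/pypi-mirror-74 | packages/xlist/xlist-0.0.8.tar.gz/xlist-0.0.8/xlist/index.py | indexes_fst_slice
-- ===== SOURCE A (Python) =====
-- def indexes_fst_slice(ol,value):
--     length = ol.__len__()
--     begin = None
--     slice = []
--     for i in range(0,length):
--         if(ol[i]==value):
--             begin = i
--             break
--         else:
--             pass
--     if(begin == None):
--         return(None)
--     else:
--         slice.append(begin)
--         for i in range(begin+1,length):
--             if(ol[i]==value):
--                 slice.append(i)
--             else:
--                 break
--     return(slice)
-- ===== SOURCE B (Python) =====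
-- def indexes_fst_slice(ol, value):
--     # run-length encode the whole list by the key (x == value), then scan the
--     # runs with a running offset and return the index range of the first True run
--     runs = []
--     for x in ol:
--         flag = (x == value)
--         if runs and runs[-1][0] == flag:
--             runs[-1][1] += 1
--         else:
--             runs.append([flag, 1])
--     i = 0
--     for flag, n in runs:
--         if flag:
--             return list(range(i, i + n))
--         i += n
--     return None
-- ===== Notes on version B (the rewrite author's own statement) =====
-- stated objective: alternative
-- what changed: Replaces A's two-phase find-the-start-then-extend scan with a run-length encoding of the whole list keyed by (x == value), followed by a scan over the runs with a running offset that returns the index range of the first True run.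
import Mathlib
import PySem

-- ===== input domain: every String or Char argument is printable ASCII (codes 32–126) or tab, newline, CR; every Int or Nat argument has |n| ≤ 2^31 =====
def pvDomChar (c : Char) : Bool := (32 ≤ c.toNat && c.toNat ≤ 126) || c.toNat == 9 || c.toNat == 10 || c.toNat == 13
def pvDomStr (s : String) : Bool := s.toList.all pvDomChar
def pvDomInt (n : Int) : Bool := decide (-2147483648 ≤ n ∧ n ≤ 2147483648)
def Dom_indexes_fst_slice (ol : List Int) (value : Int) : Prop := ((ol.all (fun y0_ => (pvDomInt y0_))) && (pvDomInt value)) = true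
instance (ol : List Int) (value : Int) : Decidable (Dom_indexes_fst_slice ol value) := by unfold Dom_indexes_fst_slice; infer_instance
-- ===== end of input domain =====

-- B run-length-encodes the list by the key (x == value) and scans the runs for the
-- first True run instead of A's find-the-start-then-extend scan (alternative algorithm).

-- ===== PORT A =====
-- first loop of A: scan range(0,length) for the first i with ol[i]==value
def aFind (ol : List Int) (value : Int) : List Int → Option Int
  | [] => none
  | i :: is => if PySem.List.pyGetD ol i 0 == value then some i else aFind ol value is

-- second loop of A: append indices while ol[i]==value, break otherwise
def aExtend (ol : List Int) (value : Int) : List Int → List Int → List Int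
  | acc, [] => acc
  | acc, i :: is =>
    if PySem.List.pyGetD ol i 0 == value then aExtend ol value (acc ++ [i]) is else acc

def indexes_fst_slice (ol : List Int) (value : Int) : Option (List Int) :=
  let length : Int := ol.length
  match aFind ol value (PySem.List.pyRange 0 length 1) with
  | none => none
  | some b => some (aExtend ol value [b] (PySem.List.pyRange (b + 1) length 1))

-- ===== PORT B =====
-- body of B's first loop: extend the last run if its key matches, else start a new run
def bStep (value : Int) (runs : List (Bool × Int)) (x : Int) : List (Bool × Int) :=
  let flag := x == value
  match runs.getLast? with
  | some (f, n) =>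
    if f == flag then runs.dropLast ++ [(f, n + 1)] else runs ++ [(flag, 1)]
  | none => [(flag, 1)]

-- B's second loop: scan the runs with a running offset, return the first True run's range
def bScan : List (Bool × Int) → Int → Option (List Int)
  | [], _ => none
  | (flag, n) :: rs, i =>
    if flag then some (PySem.List.pyRange i (i + n) 1) else bScan rs (i + n)

def indexes_fst_slice_alt (ol : List Int) (value : Int) : Option (List Int) :=
  bScan (ol.foldl (bStep value) []) 0

-- ===== PRECONDITION & SPEC =====
def Spec_indexes_fst_slice (ol : List Int) (value : Int) (out : Option (List Int)) : Prop := out = indexes_fst_slice_alt ol value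
instance (ol : List Int) (value : Int) (out : Option (List Int)) : Decidable (Spec_indexes_fst_slice ol value out) := by unfold Spec_indexes_fst_slice; infer_instance

-- ===== CLAIM (what is proved, stated in full; the proofs are below) =====
def Claim_equal_indexes_fst_slice : Prop := ∀ (ol : List Int) (value : Int), Dom_indexes_fst_slice ol value → Spec_indexes_fst_slice ol value (indexes_fst_slice ol value)

-- ===== LEMMAS AND PROOFS =====

-- length of the run of elements equal to value at the head of the suffix
def altRunLen (value : Int) : List Int → Int
  | [] => 0
  | y :: ys => if y ≠ value then 0 else altRunLen value ys + 1

-- intermediate form: walk the list keeping the index of the current element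
def altGo (value : Int) : List Int → Int → Option (List Int)
  | [], _ => none
  | x :: xs, i =>
    if x == value then some (PySem.List.pyRange i (i + altRunLen value (x :: xs)) 1)
    else altGo value xs (i + 1)

-- length of the head segment whose key (y == value) equals f
def bCnt (value : Int) (f : Bool) : List Int → Int
  | [] => 0
  | y :: ys => if (y == value) == f then bCnt value f ys + 1 else 0

-- the rest of the list after that head segment
def bDrop (value : Int) (f : Bool) : List Int → List Int
  | [] => []
  | y :: ys => if (y == value) == f then bDrop value f ys else y :: ys

theorem bDrop_length_le (value : Int) (f : Bool) (xs : List Int) :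
    (bDrop value f xs).length ≤ xs.length := by
  induction xs with
  | nil => simp [bDrop]
  | cons y ys ih =>
    by_cases h : (y == value) == f
    · simp only [bDrop, if_pos h]; exact Nat.le_succ_of_le ih
    · simp [bDrop, h]

-- the run-length encoding of xs by the key (x == value), head run first
def grp (value : Int) : List Int → List (Bool × Int)
  | [] => []
  | x :: xs =>
    ((x == value), bCnt value (x == value) xs + 1) :: grp value (bDrop value (x == value) xs)
termination_by xs => xs.length
decreasing_by
  exact Nat.lt_succ_of_le (bDrop_length_le value (x == value) xs)

theorem altRunLen_nonneg (value : Int) (xs : List Int) : 0 ≤ altRunLen value xs := by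
  induction xs with
  | nil => simp [altRunLen]
  | cons y ys ih =>
    by_cases h : y = value
    · simp [altRunLen, h]; omega
    · simp [altRunLen, h]

theorem bCnt_true_eq_runLen (value : Int) (xs : List Int) :
    bCnt value true xs = altRunLen value xs := by
  induction xs with
  | nil => simp [bCnt, altRunLen]
  | cons y ys ih =>
    by_cases h : y = value
    · simp [bCnt, altRunLen, h, ih]
    · simp [bCnt, altRunLen, h]

-- B's first loop computes grp
theorem foldl_bStep_run (value : Int) (xs : List Int) : ∀ (rs : List (Bool × Int)) (f : Bool) (n : Int),
    List.foldl (bStep value) (rs ++ [(f, n)]) xs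
      = (rs ++ [(f, n + bCnt value f xs)]) ++ grp value (bDrop value f xs) := by
  induction xs with
  | nil => intro rs f n; simp [bCnt, bDrop, grp]
  | cons x xs' ih =>
    intro rs f n
    simp only [List.foldl_cons]
    have hstep : bStep value (rs ++ [(f, n)]) x
        = if f == (x == value) then rs ++ [(f, n + 1)] else (rs ++ [(f, n)]) ++ [((x == value), 1)] := by
      simp [bStep]
    by_cases h : (x == value) = f
    · rw [hstep, if_pos (by simp [h]), ih rs f (n + 1)]
      simp only [bCnt, bDrop, if_pos (by simp [h] : ((x == value) == f) = true)]
      have : n + 1 + bCnt value f xs' = n + (bCnt value f xs' + 1) := by ring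
      rw [this]
    · rw [hstep, if_neg (by simp; intro hf; exact h hf.symm), ih (rs ++ [(f, n)]) (x == value) 1]
      simp only [bCnt, bDrop, if_neg (by simp [h] : ¬ ((x == value) == f) = true)]
      rw [grp]
      have : (1 : Int) + bCnt value (x == value) xs' = bCnt value (x == value) xs' + 1 := by ring
      rw [this]
      simp

theorem foldl_bStep_eq_grp (value : Int) (xs : List Int) :
    List.foldl (bStep value) [] xs = grp value xs := by
  cases xs with
  | nil => simp [grp]
  | cons x xs' =>
    simp only [List.foldl_cons]
    have hstep : bStep value [] x = [] ++ [((x == value), 1)] := by simp [bStep]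
    rw [hstep, foldl_bStep_run value xs' [] (x == value) 1, grp]
    have : (1 : Int) + bCnt value (x == value) xs' = bCnt value (x == value) xs' + 1 := by ring
    rw [this]
    simp

-- altGo skips a whole false run at once
theorem altGo_skip_false (value : Int) (xs : List Int) : ∀ (i : Int),
    altGo value xs i = altGo value (bDrop value false xs) (i + bCnt value false xs) := by
  induction xs with
  | nil => intro i; simp [bDrop, bCnt]
  | cons y ys ih =>
    intro i
    by_cases h : y = value
    · simp [altGo, h, bDrop, bCnt]
    · have hk : ((y == value) == false) = true := by simp [h]
      simp only [bDrop, bCnt, if_pos hk]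
      rw [altGo, if_neg (by simp [h]), ih (i + 1)]
      have : i + 1 + bCnt value false ys = i + (bCnt value false ys + 1) := by ring
      rw [this]

-- B's second loop on the run encoding equals the intermediate walk
theorem bScan_grp (value : Int) (xs : List Int) : ∀ (i : Int),
    bScan (grp value xs) i = altGo value xs i := by
  induction hL : xs.length using Nat.strong_induction_on generalizing xs with
  | _ L ih =>
  cases xs with
  | nil => intro i; simp [grp, bScan, altGo]
  | cons x xs' =>
    intro i
    rw [grp]
    by_cases h : x = value
    · simp only [bScan, if_pos (by simp [h] : (x == value) = true)]
      rw [altGo, if_pos (by simp [h])]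
      have : bCnt value true xs' + 1 = altRunLen value (x :: xs') := by
        simp [h, bCnt_true_eq_runLen, altRunLen]
      rw [show (x == value) = true by simp [h], this]
    · have hf : (x == value) = false := by simp [h]
      rw [hf]
      simp only [bScan, if_neg Bool.false_ne_true]
      rw [altGo, if_neg (by simp [h]), altGo_skip_false value xs' (i + 1)]
      have hlen : (bDrop value false xs').length < L := by
        subst hL
        exact Nat.lt_succ_of_le (bDrop_length_le value false xs')
      rw [ih _ hlen (bDrop value false xs') rfl]
      have : i + (bCnt value false xs' + 1) = i + 1 + bCnt value false xs' := by ring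
      rw [this]

-- ===== the A side: A equals the intermediate walk (proved over suffixes) =====
theorem pyGetD_append_length (pre : List Int) (x : Int) (xs : List Int) :
    PySem.List.pyGetD (pre ++ x :: xs) (pre.length : Int) 0 = x := by
  rw [PySem.List.pyGetD_natCast]
  simp [List.getD]

theorem aExtend_run (value : Int) (xs : List Int) : ∀ (pre acc : List Int),
    aExtend (pre ++ xs) value acc
      (PySem.List.pyRange (pre.length : Int) (((pre ++ xs).length : Nat) : Int) 1)
    = acc ++ PySem.List.pyRange (pre.length : Int)
        ((pre.length : Int) + altRunLen value xs) 1 := by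
  induction xs with
  | nil =>
    intro pre acc
    simp [aExtend, altRunLen, PySem.List.pyRange_one_eq_nil]
  | cons x xs' ih =>
    intro pre acc
    have hlen : ((pre.length : Int)) < (((pre ++ x :: xs').length : Nat) : Int) := by
      simp
    rw [PySem.List.pyRange_one_cons hlen, aExtend, pyGetD_append_length]
    by_cases hx : x = value
    · rw [if_pos (by simp [hx])]
      have hcast : ((pre.length : Int)) + 1 = (((pre ++ [x]).length : Nat) : Int) := by
        simp
      have := ih (pre ++ [x]) (acc ++ [(pre.length : Int)])
      rw [List.append_assoc] at this
      simp only [List.singleton_append] at this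
      rw [hcast, this]
      have hr : 0 ≤ altRunLen value xs' := altRunLen_nonneg value xs'
      have hc : (pre.length : Int) < (pre.length : Int) + altRunLen value (x :: xs') := by
        simp [altRunLen, hx]; omega
      rw [PySem.List.pyRange_one_cons hc]
      have harg : (pre.length : Int) + 1 + altRunLen value xs'
          = (pre.length : Int) + altRunLen value (x :: xs') := by
        simp [altRunLen, hx]; ring
      rw [← hcast, harg]
      simp
    · rw [if_neg (by simp [hx])]
      have h0 : altRunLen value (x :: xs') = 0 := by simp [altRunLen, hx]
      rw [h0]
      simp [PySem.List.pyRange_one_eq_nil]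

theorem main_run (value : Int) (xs : List Int) : ∀ (pre : List Int),
    (match aFind (pre ++ xs) value
        (PySem.List.pyRange (pre.length : Int) (((pre ++ xs).length : Nat) : Int) 1) with
     | none => none
     | some b => some (aExtend (pre ++ xs) value [b]
         (PySem.List.pyRange (b + 1) (((pre ++ xs).length : Nat) : Int) 1)))
    = altGo value xs (pre.length : Int) := by
  induction xs with
  | nil =>
    intro pre
    simp [aFind, altGo, PySem.List.pyRange_one_eq_nil]
  | cons x xs' ih =>
    intro pre
    have hlen : ((pre.length : Int)) < (((pre ++ x :: xs').length : Nat) : Int) := by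
      simp
    rw [PySem.List.pyRange_one_cons hlen, aFind, pyGetD_append_length]
    by_cases hx : x = value
    · rw [if_pos (by simp [hx])]
      have hcast : ((pre.length : Int)) + 1 = (((pre ++ [x]).length : Nat) : Int) := by
        simp
      have hext := aExtend_run value xs' (pre ++ [x]) [(pre.length : Int)]
      rw [List.append_assoc] at hext
      simp only [List.singleton_append] at hext
      dsimp only
      rw [hcast, hext, altGo, if_pos (by simp [hx])]
      have hr : 0 ≤ altRunLen value xs' := altRunLen_nonneg value xs'
      have hc : (pre.length : Int) < (pre.length : Int) + altRunLen value (x :: xs') := by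
        simp [altRunLen, hx]; omega
      rw [PySem.List.pyRange_one_cons hc]
      have harg : (pre.length : Int) + 1 + altRunLen value xs'
          = (pre.length : Int) + altRunLen value (x :: xs') := by
        simp [altRunLen, hx]; ring
      rw [← hcast, harg]
    · rw [if_neg (by simp [hx])]
      have hcast : ((pre.length : Int)) + 1 = (((pre ++ [x]).length : Nat) : Int) := by
        simp
      have := ih (pre ++ [x])
      rw [List.append_assoc] at this
      simp only [List.singleton_append] at this
      rw [hcast, this, altGo, if_neg (by simp [hx]), hcast]

-- ===== VERDICT (by name: the statement is the Claim_ definition above) =====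
theorem indexes_fst_slice_spec : Claim_equal_indexes_fst_slice := by
  intro ol value _
  unfold Spec_indexes_fst_slice indexes_fst_slice indexes_fst_slice_alt
  rw [foldl_bStep_eq_grp, bScan_grp]
  have := main_run value ol []
  simpa using this
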